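-- pv_equiv track=rewrite | github.com/ShubhamSKA/Games | Minesweeper/functions.py | innerarray
-- ===== SOURCE A (Python) =====
-- def innerarray(w,h,locs):
--     array=[]
--     for i in range(h):
--         array.append([])
--         for num in range(w):
--             if h*i+num in locs:
--                 x=1
--             else:
--                 x=0
--             array[i].append(x)
--     return array
-- ===== SOURCE B (Python) =====
-- def innerarray(w, h, locs):
--     array = [[0] * w for _ in range(h)]
--     for loc in locs:
--         for i in range(h):
--             num = loc - h * i
--             if 0 <= num < w:
--                 array[i][num] = 1
--     return array
-- ===== Notes on version B (the rewrite author's own statement) =====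
-- stated objective: faster
-- what changed: B pre-zeroes the grid and scatters each loc into the cells it marks (inner loop over rows with num = loc - h*i), instead of scanning every cell and testing list membership in locs.
import Mathlib
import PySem

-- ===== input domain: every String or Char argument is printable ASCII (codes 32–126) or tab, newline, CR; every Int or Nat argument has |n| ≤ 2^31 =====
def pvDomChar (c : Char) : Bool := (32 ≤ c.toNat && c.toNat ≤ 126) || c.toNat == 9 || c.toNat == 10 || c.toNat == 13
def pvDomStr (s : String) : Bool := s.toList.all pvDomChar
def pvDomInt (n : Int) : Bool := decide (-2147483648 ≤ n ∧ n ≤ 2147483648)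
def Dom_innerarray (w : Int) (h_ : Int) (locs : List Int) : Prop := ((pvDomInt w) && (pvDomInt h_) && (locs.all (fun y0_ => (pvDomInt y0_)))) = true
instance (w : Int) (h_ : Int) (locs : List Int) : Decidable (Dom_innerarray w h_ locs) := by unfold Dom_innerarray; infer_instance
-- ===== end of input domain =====

-- B scatters each loc into a pre-zeroed grid (inner row loop) instead of A's per-cell membership scan; alternative decomposition, same result.


-- ===== PORT A =====
-- for i in range(h): append a row; for num in range(w): append 1 if h*i+num in locs else 0
def innerarray (w : Int) (h_ : Int) (locs : List Int) : List (List Int) :=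
  (PySem.List.pyRange 0 h_ 1).foldl
    (fun array i =>
      array ++ [(PySem.List.pyRange 0 w 1).foldl
        (fun row num => row ++ [if h_ * i + num ∈ locs then (1 : Int) else 0]) []])
    []

-- ===== PORT B =====
-- array = [[0]*w for _ in range(h)]; for loc in locs: for i in range(h): num = loc-h*i; if 0<=num<w: array[i][num] = 1
def innerarray_alt (w : Int) (h_ : Int) (locs : List Int) : List (List Int) :=
  locs.foldl
    (fun array loc =>
      (PySem.List.pyRange 0 h_ 1).foldl
        (fun array i =>
          let num := loc - h_ * i
          if 0 ≤ num ∧ num < w then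
            array.set i.toNat ((array.getD i.toNat []).set num.toNat 1)
          else array)
        array)
    ((PySem.List.pyRange 0 h_ 1).map (fun _ => List.replicate w.toNat 0))

-- ===== PRECONDITION & SPEC =====
def Spec_innerarray (w : Int) (h_ : Int) (locs : List Int) (out : List (List Int)) : Prop := out = innerarray_alt w h_ locs
instance (w : Int) (h_ : Int) (locs : List Int) (out : List (List Int)) : Decidable (Spec_innerarray w h_ locs out) := by unfold Spec_innerarray; infer_instance

-- ===== CLAIM (what is proved, stated in full; the proofs are below) =====
def Claim_equal_innerarray : Prop := ∀ (w : Int) (h_ : Int) (locs : List Int), Dom_innerarray w h_ locs → Spec_innerarray w h_ locs (innerarray w h_ locs)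

-- ===== LEMMAS AND PROOFS =====

-- the common value: a grid whose cell (i,j) is 1 iff q i j
def pvGrid (w h_ : Int) (q : Nat → Nat → Bool) : List (List Int) :=
  (List.range h_.toNat).map (fun i => (List.range w.toNat).map (fun j => if q i j then (1 : Int) else 0))

lemma foldl_append_map {α β : Type} (f : α → β) (l : List α) (init : List β) :
    l.foldl (fun acc x => acc ++ [f x]) init = init ++ l.map f := by
  induction l generalizing init with
  | nil => simp
  | cons a t ih => simp [List.foldl, ih]

lemma pvA_eq_grid (w h_ : Int) (locs : List Int) :
    innerarray w h_ locs = pvGrid w h_ (fun i j => decide (h_ * (i : Int) + (j : Int) ∈ locs)) := by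
  unfold innerarray pvGrid
  rw [foldl_append_map]
  simp only [List.nil_append, PySem.List.pyRange_one, Int.sub_zero, List.map_map]
  refine List.map_congr_left (fun i _ => ?_)
  rw [Function.comp_apply, foldl_append_map]
  simp [List.map_map]

lemma pv_set_map_range {α : Type} (n : Nat) (f : Nat → α) (k : Nat) (v : α) (_hk : k < n) :
    ((List.range n).map f).set k v = (List.range n).map (fun i => if i = k then v else f i) := by
  apply List.ext_getElem
  · simp
  · intro i h1 h2
    simp only [List.getElem_set, List.getElem_map, List.getElem_range]
    by_cases h : k = i <;> simp [h, eq_comm]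

lemma pvGrid_congr (w h_ : Int) (q q' : Nat → Nat → Bool)
    (h : ∀ i < h_.toNat, ∀ j < w.toNat, q i j = q' i j) :
    pvGrid w h_ q = pvGrid w h_ q' := by
  unfold pvGrid
  refine List.map_congr_left (fun i hi => ?_)
  refine List.map_congr_left (fun j hj => ?_)
  rw [h i (List.mem_range.mp hi) j (List.mem_range.mp hj)]

-- one scatter step on the grid
lemma pv_step_grid (w h_ : Int) (loc : Int) (q : Nat → Nat → Bool) (a : Int)
    (ha0 : 0 ≤ a) (hah : a < h_) :
    (let num := loc - h_ * a
     if 0 ≤ num ∧ num < w then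
       (pvGrid w h_ q).set a.toNat (((pvGrid w h_ q).getD a.toNat []).set num.toNat 1)
     else pvGrid w h_ q)
    = pvGrid w h_ (fun i j => q i j || decide ((i : Int) = a ∧ loc - h_ * (i : Int) = (j : Int))) := by
  have hat : a.toNat < h_.toNat := by omega
  simp only []
  split_ifs with hin
  · have hgetD : (pvGrid w h_ q).getD a.toNat [] =
        (List.range w.toNat).map (fun j => if q a.toNat j then (1 : Int) else 0) := by
      unfold pvGrid
      rw [List.getD_eq_getElem _ _ (by simpa using hat)]
      simp
    have hnum : (loc - h_ * a).toNat < w.toNat := by omega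
    rw [hgetD, pv_set_map_range w.toNat _ _ _ hnum]
    unfold pvGrid
    rw [pv_set_map_range h_.toNat _ _ _ hat]
    refine List.map_congr_left (fun i hi => ?_)
    have hih := List.mem_range.mp hi
    by_cases hia : i = a.toNat
    · rw [if_pos hia]
      refine List.map_congr_left (fun j hj => ?_)
      have hjw := List.mem_range.mp hj
      subst hia
      have hc : ((a.toNat : Nat) : Int) = a := by omega
      by_cases hjn : j = (loc - h_ * a).toNat
      · have hd : (((a.toNat : Nat) : Int) = a ∧
            loc - h_ * ((a.toNat : Nat) : Int) = (j : Int)) := by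
          refine ⟨hc, ?_⟩
          rw [hc]
          omega
        simp [hjn, hd.1]
        exact fun _ => by omega
      · have hmax : max a 0 = a := by omega
        cases hq : q a.toNat j <;> simp [hq, hjn, hmax]
        omega
    · rw [if_neg hia]
      have hia' : ¬ ((i : Int) = a) := by omega
      simp [hia']
  · refine (pvGrid_congr _ _ _ _ (fun i _hih j hjw => ?_)).symm
    have h2 : ¬ ((i : Int) = a ∧ loc - h_ * (i : Int) = (j : Int)) := by
      rintro ⟨h1, h3⟩
      rw [h1] at h3
      exact hin ⟨by omega, by omega⟩
    simp [h2]

-- inner loop over rows for one loc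
lemma pv_inner_grid (w h_ : Int) (loc : Int) (L : List Int)
    (hL : ∀ x ∈ L, 0 ≤ x ∧ x < h_) (q : Nat → Nat → Bool) :
    L.foldl
      (fun array i =>
        let num := loc - h_ * i
        if 0 ≤ num ∧ num < w then
          array.set i.toNat ((array.getD i.toNat []).set num.toNat 1)
        else array)
      (pvGrid w h_ q)
    = pvGrid w h_ (fun i j => q i j || decide ((i : Int) ∈ L ∧ loc - h_ * (i : Int) = (j : Int))) := by
  induction L generalizing q with
  | nil => simp [pvGrid]
  | cons a t ih =>
    obtain ⟨ha0, hah⟩ := hL a List.mem_cons_self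
    simp only [List.foldl_cons]
    rw [pv_step_grid w h_ loc q a ha0 hah,
        ih (fun x hx => hL x (List.mem_cons_of_mem a hx))]
    refine pvGrid_congr _ _ _ _ (fun i _ j _ => ?_)
    cases hq : q i j <;>
      simp [hq, List.mem_cons, or_and_right, Bool.or_assoc]

-- outer loop over locs
lemma pv_outer_grid (w h_ : Int) (locs : List Int) (q : Nat → Nat → Bool) :
    locs.foldl
      (fun array loc =>
        (PySem.List.pyRange 0 h_ 1).foldl
          (fun array i =>
            let num := loc - h_ * i
            if 0 ≤ num ∧ num < w then
              array.set i.toNat ((array.getD i.toNat []).set num.toNat 1)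
            else array)
          array)
      (pvGrid w h_ q)
    = pvGrid w h_ (fun i j => q i j || decide (h_ * (i : Int) + (j : Int) ∈ locs)) := by
  induction locs generalizing q with
  | nil => exact pvGrid_congr _ _ _ _ (fun i _ j _ => by simp)
  | cons loc t ih =>
    simp only [List.foldl_cons]
    rw [pv_inner_grid w h_ loc (PySem.List.pyRange 0 h_ 1)
          (fun x hx => by simpa using (PySem.List.mem_pyRange_one.mp hx)) q,
        ih]
    refine pvGrid_congr _ _ _ _ (fun i hih j hjw => ?_)
    have h1 : (i : Int) < h_ := by omega
    have h2 : (loc - h_ * (i : Int) = (j : Int)) ↔ (h_ * (i : Int) + (j : Int) = loc) := by omega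
    cases hq : q i j <;> simp [hq, List.mem_cons, h1, h2]

lemma pvB_eq_grid (w h_ : Int) (locs : List Int) :
    innerarray_alt w h_ locs = pvGrid w h_ (fun i j => decide (h_ * (i : Int) + (j : Int) ∈ locs)) := by
  unfold innerarray_alt
  have hz : (PySem.List.pyRange 0 h_ 1).map (fun _ => List.replicate w.toNat (0 : Int))
      = pvGrid w h_ (fun _ _ => false) := by
    unfold pvGrid
    rw [PySem.List.pyRange_one, List.map_map]
    simp only [Int.sub_zero]
    refine List.map_congr_left (fun i _ => ?_)
    simp [List.map_const']
  rw [hz, pv_outer_grid]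
  exact pvGrid_congr _ _ _ _ (fun i _ j _ => by simp)

-- ===== VERDICT (by name: the statement is the Claim_ definition above) =====
theorem innerarray_spec : Claim_equal_innerarray := by
  intro w h_ locs _
  unfold Spec_innerarray
  rw [pvA_eq_grid, pvB_eq_grid]
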